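-- pv_equiv track=rewrite | github.com/vickdavinci/alpha-nextgen-v2-private | scripts/analyze_trades_v10_11.py | find_consecutive_losses
-- ===== SOURCE A (Python) =====
-- from typing import Dict, List, Tuple
--
-- def find_consecutive_losses(trades: List[Dict]) -> List[List[Dict]]:
--     """Find clusters of consecutive losses"""
--     clusters = []
--     current_cluster = []
--
--     for trade in trades:
--         if not trade["is_win"]:
--             current_cluster.append(trade)
--         else:
--             if len(current_cluster) >= 3:  # 3+ consecutive losses
--                 clusters.append(current_cluster[:])
--             current_cluster = []
--
--     if len(current_cluster) >= 3:
--         clusters.append(current_cluster)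
--
--     return clusters
-- ===== SOURCE B (Python) =====
-- def find_consecutive_losses(trades):
--     """Find clusters of consecutive losses"""
--     n = len(trades)
--     loss = [not t["is_win"] for t in trades]
--     starts = [i for i in range(n) if loss[i] and (i == 0 or not loss[i - 1])]
--     ends = [i + 1 for i in range(n) if loss[i] and (i == n - 1 or not loss[i + 1])]
--     return [trades[s:e] for s, e in zip(starts, ends) if e - s >= 3]
-- ===== Notes on version B (the rewrite author's own statement) =====
-- stated objective: alternative
-- what changed: Replaces A's accumulator/flush state machine by boundary detection: precompute the loss flags, find run starts and run ends by comparing each flag with its neighbour, then recover each long-enough cluster by slicing trades[start:end].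
import Mathlib
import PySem

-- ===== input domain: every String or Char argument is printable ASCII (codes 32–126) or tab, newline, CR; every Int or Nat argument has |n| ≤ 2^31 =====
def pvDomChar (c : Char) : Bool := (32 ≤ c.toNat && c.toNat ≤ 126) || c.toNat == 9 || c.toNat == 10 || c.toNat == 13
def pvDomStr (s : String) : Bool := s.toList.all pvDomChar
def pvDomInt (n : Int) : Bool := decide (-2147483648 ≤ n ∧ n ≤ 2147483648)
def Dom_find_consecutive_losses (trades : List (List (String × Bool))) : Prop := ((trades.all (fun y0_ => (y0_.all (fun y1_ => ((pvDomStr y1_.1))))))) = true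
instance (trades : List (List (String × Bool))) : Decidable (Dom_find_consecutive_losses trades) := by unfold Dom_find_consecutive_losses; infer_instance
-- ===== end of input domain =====

-- ===== PORT A =====
-- B replaces A's accumulator/flush state machine by boundary detection over the loss flags plus slicing.
-- trade["is_win"] (first-match assoc-list lookup; Pre_ excludes the KeyError case, where getD's default is never reached)
def isLossTrade (t : List (String × Bool)) : Bool := !((t.lookup "is_win").getD true)

-- A's for-loop as structural recursion over the same (clusters, current_cluster) state
def aLoop : List (List (String × Bool)) → List (List (List (String × Bool))) → List (List (String × Bool)) → List (List (List (String × Bool)))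
  | [], clusters, cur => if cur.length ≥ 3 then clusters ++ [cur] else clusters
  | t :: ts, clusters, cur =>
    if isLossTrade t then aLoop ts clusters (cur ++ [t])
    else aLoop ts (if cur.length ≥ 3 then clusters ++ [cur] else clusters) []

def find_consecutive_losses (trades : List (List (String × Bool))) : List (List (List (String × Bool))) :=
  aLoop trades [] []

-- ===== PORT B =====
-- loss = [not t["is_win"] for t in trades]; starts/ends are index comprehensions over range(n);
-- the result slices trades[s:e] for each run with e - s >= 3 (exact transliteration of Source B)
def find_consecutive_losses_alt (trades : List (List (String × Bool))) : List (List (List (String × Bool))) :=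
  let n := trades.length
  let loss := trades.map isLossTrade
  let starts := (List.range n).filter (fun i => loss.getD i false && (i == 0 || !(loss.getD (i - 1) false)))
  let ends := ((List.range n).filter (fun i => loss.getD i false && (i == n - 1 || !(loss.getD (i + 1) false)))).map (· + 1)
  ((starts.zip ends).filter (fun p => decide (p.2 - p.1 ≥ 3))).map (fun p => (trades.drop p.1).take (p.2 - p.1))

-- ===== PRECONDITION & SPEC =====
-- Pre_ excludes exactly the trades lacking an "is_win" key, on which Python A (and B) raise KeyError.
def Pre_find_consecutive_losses (trades : List (List (String × Bool))) : Prop :=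
  ∀ t ∈ trades, (t.lookup "is_win").isSome = true
instance (trades : List (List (String × Bool))) : Decidable (Pre_find_consecutive_losses trades) := by
  unfold Pre_find_consecutive_losses; infer_instance
def pvWitness_find_consecutive_losses : (List (List (String × Bool))) :=
  [[("is_win", false)], [("is_win", false)], [("is_win", false)], [("is_win", true)]]

def Spec_find_consecutive_losses (trades : List (List (String × Bool))) (out : List (List (List (String × Bool)))) : Prop := out = find_consecutive_losses_alt trades
instance (trades : List (List (String × Bool))) (out : List (List (List (String × Bool)))) : Decidable (Spec_find_consecutive_losses trades out) := by unfold Spec_find_consecutive_losses; infer_instance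

-- ===== CLAIM (what is proved, stated in full; the proofs are below) =====
def Claim_equal_find_consecutive_losses : Prop := ∀ (trades : List (List (String × Bool))), Dom_find_consecutive_losses trades → Pre_find_consecutive_losses trades → Spec_find_consecutive_losses trades (find_consecutive_losses trades)

-- ===== LEMMAS AND PROOFS =====

theorem alt_nil : find_consecutive_losses_alt [] = [] := rfl

-- recursive characterisations of B's two index comprehensions
def startAux : Bool → List Bool → List Nat
  | _, [] => []
  | prev, b :: L => (if b && !prev then [0] else []) ++ (startAux b L).map (· + 1)

def endAux : List Bool → List Nat
  | [] => []
  | b :: L => (if b && (match L with | [] => true | c :: _ => !c) then [0] else []) ++ (endAux L).map (· + 1)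

theorem startFilter (L : List Bool) (prev : Bool) :
    (List.range L.length).filter
      (fun i => L.getD i false && ((i == 0 && !prev) || (!(i == 0) && !(L.getD (i - 1) false))))
      = startAux prev L := by
  induction L generalizing prev with
  | nil => rfl
  | cons b L ih =>
    rw [List.length_cons, List.range_succ_eq_map, List.filter_cons, List.filter_map]
    have hc : ∀ i ∈ List.range L.length,
        ((fun i => (b :: L).getD i false &&
            ((i == 0 && !prev) || (!(i == 0) && !((b :: L).getD (i - 1) false)))) ∘ Nat.succ) i
        = (fun i => L.getD i false && ((i == 0 && !b) || (!(i == 0) && !(L.getD (i - 1) false)))) i := by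
      intro i _
      cases i <;> simp
    rw [List.filter_congr hc, ih b]
    by_cases hb : (b && !prev) = true <;> simp [startAux, hb]

theorem endFilter (L : List Bool) :
    (List.range L.length).filter
      (fun i => L.getD i false && (i == L.length - 1 || !(L.getD (i + 1) false)))
      = endAux L := by
  induction L with
  | nil => rfl
  | cons b L ih =>
    rw [List.length_cons, List.range_succ_eq_map, List.filter_cons, List.filter_map]
    have hc : ∀ i ∈ List.range L.length,
        ((fun i => (b :: L).getD i false &&
            (i == L.length + 1 - 1 || !((b :: L).getD (i + 1) false))) ∘ Nat.succ) i
        = (fun i => L.getD i false && (i == L.length - 1 || !(L.getD (i + 1) false))) i := by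
      intro i hi
      have hi' := List.mem_range.1 hi
      have hbeq : ((i + 1 : Nat) == L.length + 1 - 1) = (i == L.length - 1) := by
        apply Bool.eq_iff_iff.mpr
        simp only [beq_iff_eq]
        omega
      simp only [Function.comp, Nat.succ_eq_add_one, List.getD_cons_succ, hbeq]
    rw [List.filter_congr hc, ih]
    rcases L with _ | ⟨c, L'⟩
    · cases b <;> simp [endAux]
    · cases b <;> cases c <;> simp [endAux]

-- B in terms of startAux/endAux
theorem alt_eq (trades : List (List (String × Bool))) :
    find_consecutive_losses_alt trades =
      (((startAux false (trades.map isLossTrade)).zip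
          ((endAux (trades.map isLossTrade)).map (· + 1))).filter
        (fun p => decide (p.2 - p.1 ≥ 3))).map
        (fun p => (trades.drop p.1).take (p.2 - p.1)) := by
  simp only [find_consecutive_losses_alt]
  rw [show trades.length = (trades.map isLossTrade).length from (List.length_map ..).symm]
  have hs : ∀ i ∈ List.range (trades.map isLossTrade).length,
      ((trades.map isLossTrade).getD i false &&
        (i == 0 || !((trades.map isLossTrade).getD (i - 1) false)))
      = ((trades.map isLossTrade).getD i false &&
        ((i == 0 && !false) || (!(i == 0) && !((trades.map isLossTrade).getD (i - 1) false)))) := by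
    intro i _
    cases h : (i == 0) <;> simp_all
  rw [List.filter_congr hs, startFilter, endFilter]

-- A's clusters accumulator only ever grows on the left
theorem aLoop_acc (ts : List (List (String × Bool))) :
    ∀ cl cur, aLoop ts cl cur = cl ++ aLoop ts [] cur := by
  induction ts with
  | nil => intro cl cur; simp only [aLoop]; split <;> simp
  | cons t ts ih =>
    intro cl cur
    simp only [aLoop]
    split
    · rw [ih cl, ih []]
    · rw [ih (if cur.length ≥ 3 then cl ++ [cur] else cl) [],
          ih (if cur.length ≥ 3 then [] ++ [cur] else []) []]
      split <;> simp

-- shifting lemmas for the boundary lists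
theorem startAux_false_of_ok (R : List Bool) (hR : R = [] ∨ ∃ R', R = false :: R') :
    startAux true R = startAux false R := by
  rcases hR with h | ⟨R', h⟩ <;> subst h <;> simp [startAux]

theorem startAux_true_rep (k : Nat) (R : List Bool) :
    startAux true (List.replicate k true ++ R) = (startAux true R).map (· + k) := by
  induction k with
  | zero => simp
  | succ k ih =>
    simp only [List.replicate_succ, List.cons_append, startAux, ih, List.map_map]
    simp

theorem startAux_block (m : Nat) (R : List Bool) (hm : 1 ≤ m)
    (hR : R = [] ∨ ∃ R', R = false :: R') :
    startAux false (List.replicate m true ++ R) = 0 :: (startAux false R).map (· + m) := by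
  obtain ⟨k, rfl⟩ : ∃ k, m = k + 1 := ⟨m - 1, by omega⟩
  rw [List.replicate_succ, List.cons_append]
  simp only [startAux, startAux_true_rep, startAux_false_of_ok R hR, List.map_map]
  simp

theorem endAux_cons_cons (b c : Bool) (L : List Bool) :
    endAux (b :: c :: L) = (if b && !c then [0] else []) ++ (endAux (c :: L)).map (· + 1) := rfl

theorem endAux_block (m : Nat) (R : List Bool) (hm : 1 ≤ m)
    (hR : R = [] ∨ ∃ R', R = false :: R') :
    endAux (List.replicate m true ++ R) = (m - 1) :: (endAux R).map (· + m) := by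
  obtain ⟨k, rfl⟩ : ∃ k, m = k + 1 := ⟨m - 1, by omega⟩
  clear hm
  induction k with
  | zero =>
    rcases hR with h | ⟨R', h⟩ <;> subst h <;> simp [endAux]
  | succ k ih =>
    have hL' : List.replicate (k + 1 + 1) true ++ R
        = true :: true :: (List.replicate k true ++ R) := by
      simp [List.replicate_succ]
    rw [hL', endAux_cons_cons]
    have hback : (true : Bool) :: (List.replicate k true ++ R)
        = List.replicate (k + 1) true ++ R := by
      simp [List.replicate_succ]
    rw [hback, ih]
    simp [List.map_map, Nat.add_assoc]

-- B-level step lemmas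
theorem alt_win_head (t : List (String × Bool)) (ts : List (List (String × Bool)))
    (ht : isLossTrade t = false) :
    find_consecutive_losses_alt (t :: ts) = find_consecutive_losses_alt ts := by
  rw [alt_eq, alt_eq]
  have hmap : (t :: ts).map isLossTrade = false :: ts.map isLossTrade := by simp [ht]
  rw [hmap]
  have h1 : startAux false (false :: ts.map isLossTrade)
      = (startAux false (ts.map isLossTrade)).map (· + 1) := by simp [startAux]
  have h2 : endAux (false :: ts.map isLossTrade)
      = (endAux (ts.map isLossTrade)).map (· + 1) := by simp [endAux]
  rw [h1, h2, List.map_map,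
      show ((· + 1) ∘ (· + 1) : Nat → Nat) = fun e => (e + 1) + 1 from rfl]
  rw [show (fun e => (e + 1) + 1 : Nat → Nat) = (· + 1) ∘ (· + 1) from rfl, ← List.map_map,
      List.zip_map, List.filter_map, List.map_map]
  have hcond : ∀ p ∈ (startAux false (ts.map isLossTrade)).zip
      ((endAux (ts.map isLossTrade)).map (· + 1)),
      ((fun p : Nat × Nat => decide (p.2 - p.1 ≥ 3)) ∘ Prod.map (· + 1) (· + 1)) p
        = (fun p : Nat × Nat => decide (p.2 - p.1 ≥ 3)) p := by
    intro p _
    rcases p with ⟨s, e⟩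
    simp only [Function.comp, Prod.map]
    simp only [Nat.add_sub_add_right]
  rw [List.filter_congr hcond]
  apply List.map_congr_left
  intro p _
  rcases p with ⟨s, e⟩
  simp only [Function.comp, Prod.map, List.drop_succ_cons]
  rw [Nat.add_sub_add_right]

theorem alt_loss_block (cur : List (List (String × Bool))) (rest : List (List (String × Bool)))
    (hne : cur ≠ []) (hl : ∀ x ∈ cur, isLossTrade x = true)
    (hr : rest = [] ∨ ∃ u us, rest = u :: us ∧ isLossTrade u = false) :
    find_consecutive_losses_alt (cur ++ rest) =
      (if cur.length ≥ 3 then [cur] else []) ++ find_consecutive_losses_alt rest := by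
  have hmpos : 1 ≤ cur.length := List.length_pos_iff.mpr hne
  have hcur : cur.map isLossTrade = List.replicate cur.length true := by
    have h := List.eq_replicate_of_mem (a := true)
      (l := cur.map isLossTrade) (by simpa using fun x hx => hl x hx)
    rwa [List.length_map] at h
  have hrflag : (rest.map isLossTrade) = [] ∨ ∃ R', rest.map isLossTrade = false :: R' := by
    rcases hr with h | ⟨u, us, h, hu⟩
    · left; simp [h]
    · right; exact ⟨us.map isLossTrade, by simp [h, hu]⟩
  rw [alt_eq, alt_eq]
  have hmap : (cur ++ rest).map isLossTrade
      = List.replicate cur.length true ++ rest.map isLossTrade := by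
    rw [List.map_append, hcur]
  rw [hmap, startAux_block cur.length _ hmpos hrflag, endAux_block cur.length _ hmpos hrflag]
  set S := startAux false (rest.map isLossTrade) with hS
  set E := endAux (rest.map isLossTrade) with hE
  set m := cur.length with hm
  -- ends list: map (+1) over (m-1) :: map (+m) E
  rw [List.map_cons, show m - 1 + 1 = m from by omega]
  have hswap : (E.map (· + m)).map (· + 1) = (E.map (· + 1)).map (· + m) := by
    simp only [List.map_map]
    congr 1
    funext e
    simp only [Function.comp_apply]
    omega
  rw [hswap, List.zip_cons_cons, List.zip_map, List.filter_cons]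
  have hcond : ∀ p ∈ S.zip (E.map (· + 1)),
      ((fun p : Nat × Nat => decide (p.2 - p.1 ≥ 3)) ∘ Prod.map (· + m) (· + m)) p
        = (fun p : Nat × Nat => decide (p.2 - p.1 ≥ 3)) p := by
    intro p _
    rcases p with ⟨s, e⟩
    simp only [Function.comp, Prod.map]
    simp only [Nat.add_sub_add_right]
  have hslice : ∀ p ∈ (S.zip (E.map (· + 1))).filter (fun p : Nat × Nat => decide (p.2 - p.1 ≥ 3)),
      ((fun p : Nat × Nat => ((cur ++ rest).drop p.1).take (p.2 - p.1)) ∘ Prod.map (· + m) (· + m)) p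
        = (fun p : Nat × Nat => (rest.drop p.1).take (p.2 - p.1)) p := by
    intro p _
    rcases p with ⟨s, e⟩
    simp only [Function.comp, Prod.map]
    rw [Nat.add_sub_add_right, show s + m = cur.length + s from by omega,
        List.drop_length_add_append]
  by_cases h3 : m ≥ 3
  · rw [if_pos (by simpa using h3)]
    simp only [List.map_cons]
    rw [List.filter_map, List.filter_congr hcond, List.map_map, List.map_congr_left hslice]
    have hhead : ((cur ++ rest).drop 0).take (m - 0) = cur := by
      rw [List.drop_zero, Nat.sub_zero, hm, List.take_left]
    rw [hhead, if_pos h3]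
    simp
  · rw [if_neg (by simpa using h3)]
    rw [List.filter_map, List.filter_congr hcond, List.map_map, List.map_congr_left hslice]
    rw [if_neg h3]
    simp

-- main invariant: A's loop with pending all-loss block cur equals B on cur ++ ts
theorem aLoop_eq_alt (ts : List (List (String × Bool))) :
    ∀ cur, (∀ x ∈ cur, isLossTrade x = true) →
      aLoop ts [] cur = find_consecutive_losses_alt (cur ++ ts) := by
  induction ts with
  | nil =>
    intro cur hl
    cases hcur : cur with
    | nil => simp [aLoop, alt_nil]
    | cons c cs =>
      subst hcur
      simp only [List.append_nil]
      have hb := alt_loss_block (c :: cs) [] (by simp) hl (Or.inl rfl)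
      simp only [List.append_nil] at hb
      rw [hb, alt_nil]
      simp only [aLoop]
      by_cases h3 : (c :: cs).length ≥ 3 <;> simp_all
  | cons t ts ih =>
    intro cur hl
    by_cases ht : isLossTrade t = true
    · have hcur' : ∀ x ∈ cur ++ [t], isLossTrade x = true := by
        intro x hx
        rcases List.mem_append.1 hx with h | h
        · exact hl x h
        · simp at h; subst h; exact ht
      rw [show aLoop (t :: ts) [] cur = aLoop ts [] (cur ++ [t]) from by simp [aLoop, ht]]
      rw [ih (cur ++ [t]) hcur']
      simp
    · simp only [Bool.not_eq_true] at ht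
      rw [show aLoop (t :: ts) [] cur
            = aLoop ts (if cur.length ≥ 3 then [] ++ [cur] else []) [] from by
          simp [aLoop, ht]]
      rw [aLoop_acc, ih [] (by simp)]
      cases hcur : cur with
      | nil =>
        simp only [List.nil_append]
        rw [alt_win_head t ts ht]
        simp
      | cons c cs =>
        subst hcur
        rw [alt_loss_block _ (t :: ts) (by simp) hl (Or.inr ⟨t, ts, rfl, ht⟩),
            alt_win_head t ts ht]
        by_cases h3 : (c :: cs).length ≥ 3 <;> simp_all

-- ===== VERDICT (by name: the statement is the Claim_ definition above) =====
theorem find_consecutive_losses_spec : Claim_equal_find_consecutive_losses := by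
  intro trades _ _
  unfold Spec_find_consecutive_losses find_consecutive_losses
  simpa using aLoop_eq_alt trades [] (by simp)
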